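-- pv_equiv track=rewrite | github.com/bataill3/pastard | options.py | check
-- ===== SOURCE A (Python) =====
-- def check(*arguments):
--     FILE = 'NONE'
--     TITLE = 'NONE'
--     args = arguments[0]
--
--     for i in range(0, len(args) - 1):
--         if args[i] == '-f':
--             FILE = args[i + 1]
--         elif args[i] == '-t':
--             TITLE = args[i + 1]
--
--     return FILE, TITLE
-- ===== SOURCE B (Python) =====
-- def check(*arguments):
--     args = arguments[0]
--
--     def last_value(flag):
--         # scan backwards; the first match from the end is the last occurrence
--         for i in range(len(args) - 2, -1, -1):
--             if args[i] == flag: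
--                 return args[i + 1]
--         return 'NONE'
--
--     return last_value('-f'), last_value('-t')
-- ===== Notes on version B (the rewrite author's own statement) =====
-- stated objective: alternative
-- what changed: Instead of one forward pass threading two accumulators with per-token flag branches, B searches BACKWARDS per flag (range(len(args)-2,-1,-1)) and returns at the first match from the end, which is the last occurrence; no accumulators, two staged early-exit reverse searches.
import Mathlib
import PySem

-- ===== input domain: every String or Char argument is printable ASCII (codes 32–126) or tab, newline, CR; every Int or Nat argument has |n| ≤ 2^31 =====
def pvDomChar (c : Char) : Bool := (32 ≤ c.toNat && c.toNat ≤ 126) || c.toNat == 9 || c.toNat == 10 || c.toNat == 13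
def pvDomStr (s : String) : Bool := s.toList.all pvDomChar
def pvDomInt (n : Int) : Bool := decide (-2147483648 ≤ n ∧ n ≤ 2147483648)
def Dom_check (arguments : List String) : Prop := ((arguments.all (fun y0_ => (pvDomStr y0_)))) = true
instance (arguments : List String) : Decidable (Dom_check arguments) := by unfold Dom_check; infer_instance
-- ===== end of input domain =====

-- B replaces A's forward pass with two accumulators by a per-flag BACKWARDS search with early
-- exit (first match from the end = last occurrence); objective: alternative, same cost.

-- ===== PORT A =====
-- indices drawn from range(0, len(args)-1) are always in bounds, so pyGet? is defaulted safely
def check (arguments : List String) : String × String :=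
  (PySem.List.pyRange 0 ((arguments.length : Int) - 1) 1).foldl
    (fun (st : String × String) i =>
      if (PySem.List.pyGet? arguments i).getD "" = "-f" then
        ((PySem.List.pyGet? arguments (i + 1)).getD "", st.2)
      else if (PySem.List.pyGet? arguments i).getD "" = "-t" then
        (st.1, (PySem.List.pyGet? arguments (i + 1)).getD "")
      else st)
    ("NONE", "NONE")

-- ===== PORT B =====
-- last_value(flag): backwards scan with early return = findSome? over the countdown range
def lastValue (args : List String) (flag : String) : String :=
  match (PySem.List.pyRange ((args.length : Int) - 2) (-1) (-1)).findSome?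
      (fun i =>
        if (PySem.List.pyGet? args i).getD "" = flag then
          some ((PySem.List.pyGet? args (i + 1)).getD "")
        else none) with
  | some v => v
  | none => "NONE"

def check_alt (arguments : List String) : String × String :=
  (lastValue arguments "-f", lastValue arguments "-t")

-- ===== PRECONDITION & SPEC =====
def Spec_check (arguments : List String) (out : String × String) : Prop := out = check_alt arguments
instance (arguments : List String) (out : String × String) : Decidable (Spec_check arguments out) := by unfold Spec_check; infer_instance

-- ===== CLAIM (what is proved, stated in full; the proofs are below) =====
def Claim_equal_check : Prop := ∀ (arguments : List String), Dom_check arguments → Spec_check arguments (check arguments)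

-- ===== LEMMAS AND PROOFS =====

-- the option-valued picker for one flag
def pick (args : List String) (flag : String) (i : Int) : Option String :=
  if (PySem.List.pyGet? args i).getD "" = flag then
    some ((PySem.List.pyGet? args (i + 1)).getD "")
  else none

-- A's fold over any index list l: each component is the first match of the REVERSED list,
-- defaulting to the incoming accumulator component
theorem check_fold_eq_reverse_find (args : List String) (l : List Int)
    (st : String × String) :
    l.foldl
      (fun (st : String × String) i =>
        if (PySem.List.pyGet? args i).getD "" = "-f" then
          ((PySem.List.pyGet? args (i + 1)).getD "", st.2)
        else if (PySem.List.pyGet? args i).getD "" = "-t" then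
          (st.1, (PySem.List.pyGet? args (i + 1)).getD "")
        else st)
      st
    =
    ((l.reverse.findSome? (pick args "-f")).getD st.1,
     (l.reverse.findSome? (pick args "-t")).getD st.2) := by
  induction l generalizing st with
  | nil => simp
  | cons i rest ih =>
    simp only [List.foldl_cons, List.reverse_cons, List.findSome?_append,
               List.findSome?_cons, List.findSome?_nil]
    rw [ih]
    by_cases h1 : (PySem.List.pyGet? args i).getD "" = "-f"
    · cases hf : rest.reverse.findSome? (pick args "-f") <;>
      cases ht : rest.reverse.findSome? (pick args "-t") <;>
        simp [pick, h1]
    · by_cases h2 : (PySem.List.pyGet? args i).getD "" = "-t"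
      · cases hf : rest.reverse.findSome? (pick args "-f") <;>
        cases ht : rest.reverse.findSome? (pick args "-t") <;>
          simp [pick, h2]
      · cases hf : rest.reverse.findSome? (pick args "-f") <;>
        cases ht : rest.reverse.findSome? (pick args "-t") <;>
          simp [pick, h1, h2]

-- ===== VERDICT (by name: the statement is the Claim_ definition above) =====
theorem check_spec : Claim_equal_check := by
  intro args _
  unfold Spec_check check check_alt lastValue
  rw [check_fold_eq_reverse_find]
  have hrev : PySem.List.pyRange ((args.length : Int) - 2) (-1) (-1)
      = (PySem.List.pyRange 0 ((args.length : Int) - 1) 1).reverse := by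
    rw [PySem.List.pyRange_neg_one_eq_reverse]
    have h2 : ((-1 : Int) + 1) = 0 := by norm_num
    have h3 : ((args.length : Int) - 2 + 1) = (args.length : Int) - 1 := by ring
    rw [h2, h3]
  rw [hrev]
  unfold pick
  cases hf : (PySem.List.pyRange 0 ((args.length : Int) - 1) 1).reverse.findSome?
      (fun i => if (PySem.List.pyGet? args i).getD "" = "-f" then
        some ((PySem.List.pyGet? args (i + 1)).getD "") else none) <;>
  cases ht : (PySem.List.pyRange 0 ((args.length : Int) - 1) 1).reverse.findSome?
      (fun i => if (PySem.List.pyGet? args i).getD "" = "-t" then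
        some ((PySem.List.pyGet? args (i + 1)).getD "") else none) <;>
    simp
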